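-- pv_equiv track=rewrite | github.com/maxwell-gisborne/lisps | lisp-4.py | wordify
-- ===== SOURCE A (Python) =====
-- def wordify(string: str):
--     class Mode:
--         normal = 0
--         quote = 1
--
--     buffer = ''
--     quote_string = None
--     mode = Mode.normal
--     for key in string:
--         match mode:
--             case Mode.normal:
--                 if key in {' ', '\n', '\t'}:
--                     if buffer != '':
--                         yield buffer
--                         buffer = ''
--                 elif key in {'(', ')'}:
--                     if buffer != '':
--                         yield buffer
--                         buffer = ''
--                     yield key
--                 elif key in {'"', "'"}:
--                     if buffer != '':
--                         yield buffer
--                     quote_string = key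
--                     mode = Mode.quote
--                 else:
--                     buffer += key
--             case Mode.quote:
--                 if key == quote_string:
--                     yield '"' + buffer + '"'
--                     buffer = ''
--                     mode = Mode.normal
--                 else:
--                     buffer += key
--
--     else:
--         if buffer != '':
--             yield buffer
-- ===== SOURCE B (Python) =====
-- def wordify(string: str):
--     # Index scanner: yields slices of plain-text runs; a quoted section is
--     # consumed in one step with str.find and rendered as "content".
--     i = 0
--     start = 0
--     n = len(string)
--     while i < n:
--         c = string[i]
--         if c in ' \n\t':
--             if start < i:
--                 yield string[start:i]
--             i += 1
--             start = i
--         elif c in '()':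
--             if start < i:
--                 yield string[start:i]
--             yield c
--             i += 1
--             start = i
--         elif c in '"\'':
--             if start < i:
--                 yield string[start:i]
--             j = string.find(c, i + 1)
--             if j == -1:
--                 rest = string[i + 1:]
--                 if rest:
--                     yield rest
--                 return
--             yield '"' + string[i + 1:j] + '"'
--             i = j + 1
--             start = i
--         else:
--             i += 1
--     if start < n:
--         yield string[start:]
-- ===== Notes on version B (the rewrite author's own statement) =====
-- stated objective: alternative
-- what changed: Replaced the Mode-enum character state machine (buffer, quote mode, quote_string) with an index scanner that yields string slices of plain-text runs and consumes each quoted section in one step via str.find.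
-- intended difference: On strings where a quote character opens directly after a pending word (e.g. 'a"b"'), A yields the word and then also embeds it inside the quoted token (['a', '"ab"']; with an unterminated quote it re-emits it glued to the tail), while B yields the word once and the quoted token carries only the quoted text (['a', '"b"']), which is the intended tokenization. — e.g. on wordify("a\"b\""): A returns ["a", "\"ab\""], B returns ["a", "\"b\""]
import Mathlib
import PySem

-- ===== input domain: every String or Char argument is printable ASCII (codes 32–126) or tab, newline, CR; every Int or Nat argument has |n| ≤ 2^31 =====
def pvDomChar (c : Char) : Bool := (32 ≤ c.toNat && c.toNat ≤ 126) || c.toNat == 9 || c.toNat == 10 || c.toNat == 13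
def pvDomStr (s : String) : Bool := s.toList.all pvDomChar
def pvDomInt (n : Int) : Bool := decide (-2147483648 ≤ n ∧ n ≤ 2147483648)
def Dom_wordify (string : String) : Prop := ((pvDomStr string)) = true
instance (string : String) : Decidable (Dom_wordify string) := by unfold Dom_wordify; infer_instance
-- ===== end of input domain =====

-- B replaces A's Mode-enum character state machine (explicit buffer, quote mode) by an
-- index scanner that yields slices of plain-text runs and consumes each quoted section
-- in one step with str.find (objective: alternative decomposition, comparable cost).
-- On a quote opening directly after a pending word A duplicates the word inside the
-- quoted token; B does not (the stated intended difference, region D_ below).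
-- Both are generators; neither mutates its argument.

-- ===== PORT A =====
-- state = (tokens yielded so far, buffer as List Char, quote_string: none = Mode.normal, some q = Mode.quote)
def wordifyStep (st : List String × List Char × Option Char) (key : Char) :
    List String × List Char × Option Char :=
  match st with
  | (out, buffer, none) =>
    if key = ' ' ∨ key = '\n' ∨ key = '\t' then
      if buffer ≠ [] then (out ++ [String.ofList buffer], [], none) else (out, buffer, none)
    else if key = '(' ∨ key = ')' then
      ((if buffer ≠ [] then out ++ [String.ofList buffer] else out) ++ [String.ofList [key]], [], none)
    else if key = '"' ∨ key = '\'' then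
      ((if buffer ≠ [] then out ++ [String.ofList buffer] else out), buffer, some key)
    else
      (out, buffer ++ [key], none)
  | (out, buffer, some q) =>
    if key = q then
      (out ++ [String.ofList ('"' :: buffer ++ ['"'])], [], none)
    else
      (out, buffer ++ [key], some q)

def wordify (string : String) : List String :=
  let fin := string.toList.foldl wordifyStep ([], [], none)
  fin.1 ++ (if fin.2.1 ≠ [] then [String.ofList fin.2.1] else [])

-- ===== PORT B =====
-- string[a:b] for 0 ≤ a ≤ b (the only way B uses slices)
def sliceBT (cs : List Char) (a b : Nat) : List Char := (cs.take b).drop a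

def wordifyBLoop (cs : List Char) (start i : Nat) : List String :=
  if hi : i < cs.length then
    let key := cs[i]
    if key = ' ' ∨ key = '\n' ∨ key = '\t' then
      (if start < i then [String.ofList (sliceBT cs start i)] else []) ++
        wordifyBLoop cs (i + 1) (i + 1)
    else if key = '(' ∨ key = ')' then
      (if start < i then [String.ofList (sliceBT cs start i)] else []) ++
        [String.ofList [key]] ++ wordifyBLoop cs (i + 1) (i + 1)
    else if key = '"' ∨ key = '\'' then
      (if start < i then [String.ofList (sliceBT cs start i)] else []) ++
        -- j = string.find(key, i + 1)
        (let j := PySem.Chars.findFrom cs [key] ((i + 1 : Nat) : Int) none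
         if j = -1 then
           let rest := cs.drop (i + 1)
           if rest ≠ [] then [String.ofList rest] else []
         else
           [String.ofList ('"' :: sliceBT cs (i + 1) j.toNat ++ ['"'])] ++
             wordifyBLoop cs (j.toNat + 1) (j.toNat + 1))
    else
      wordifyBLoop cs start (i + 1)
  else
    if start < cs.length then [String.ofList (cs.drop start)] else []
termination_by cs.length - i
decreasing_by
  · omega
  · omega
  · have hk : i + 1 ≤ cs.length := by omega
    have := (PySem.Chars.findFrom_natCast_spec cs [cs[i]] (i + 1) hk (by
      simpa using ‹¬PySem.Chars.findFrom cs [cs[i]] ((i + 1 : Nat) : Int) none = -1›)).1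
    omega
  · omega

def wordify_alt (string : String) : List String :=
  wordifyBLoop string.toList 0 0

-- ===== PRECONDITION & SPEC =====
-- dScan l pending quote = true iff, scanning l in normal mode with 'pending' = "a word run
-- is open" (quote = some q: inside a q-quoted section, skipped), some quote character opens
-- while a word run is open.
def dScan (l : List Char) (pending : Bool) (quote : Option Char) : Bool :=
  match l, pending, quote with
  | [], _, _ => false
  | c :: rest, pending, some q => if c = q then dScan rest false none else dScan rest pending (some q)
  | c :: rest, pending, none =>
    if c = ' ' ∨ c = '\n' ∨ c = '\t' ∨ c = '(' ∨ c = ')' then dScan rest false none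
    else if c = '"' ∨ c = '\'' then (if pending then true else dScan rest false (some c))
    else dScan rest true none

-- On strings where a quote opens directly after a pending word, A yields the word and then
-- also embeds it inside the quoted token (glued to the tail if the quote is unterminated),
-- while B yields the word once and the quoted token carries only the quoted text, which is
-- the intended tokenization.
def D_wordify (string : String) : Prop := dScan string.toList false none = true
instance (string : String) : Decidable (D_wordify string) := by unfold D_wordify; infer_instance

def Spec_wordify (string : String) (out : List String) : Prop := ¬ D_wordify string → out = wordify_alt string
instance (string : String) (out : List String) : Decidable (Spec_wordify string out) := by unfold Spec_wordify; infer_instance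

def pvDiffWitness_wordify : String := "a\"b\""
def pvDiffWitnessOut_wordify : (List String) × (List String) := (["a", "\"ab\""], ["a", "\"b\""])

-- ===== CLAIM (what is proved, stated in full; the proofs are below) =====
def Claim_unchanged_wordify : Prop := ∀ (string : String), Dom_wordify string → Spec_wordify string (wordify string)
def Claim_changed_wordify : Prop := Dom_wordify (pvDiffWitness_wordify) ∧ D_wordify (pvDiffWitness_wordify) ∧ wordify (pvDiffWitness_wordify) = pvDiffWitnessOut_wordify.1 ∧ wordify_alt (pvDiffWitness_wordify) = pvDiffWitnessOut_wordify.2 ∧ pvDiffWitnessOut_wordify.1 ≠ pvDiffWitnessOut_wordify.2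
def Claim_exact_wordify : Prop := ∀ (string : String), Dom_wordify string → D_wordify string → wordify string ≠ wordify_alt string

-- ===== LEMMAS AND PROOFS =====

-- emit a nonempty buffer (A's repeated 'if buffer != '': yield buffer')
def flushB (buffer : List Char) : List String :=
  if buffer = [] then [] else [String.ofList buffer]

-- A's loop rephrased as recursion carrying the normal-mode buffer
def bufLoop (buffer : List Char) (rest : List Char) : List String :=
  match rest with
  | [] => flushB buffer
  | key :: rest =>
    if key = ' ' ∨ key = '\n' ∨ key = '\t' then
      flushB buffer ++ bufLoop [] rest
    else if key = '(' ∨ key = ')' then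
      flushB buffer ++ [String.ofList [key]] ++ bufLoop [] rest
    else if key = '"' ∨ key = '\'' then
      flushB buffer ++
        match rest.findIdx? (· = key) with
        | none => flushB (buffer ++ rest)
        | some j =>
            [String.ofList ('"' :: buffer ++ rest.take j ++ ['"'])] ++ bufLoop [] (rest.drop (j + 1))
    else
      bufLoop (buffer ++ [key]) rest
termination_by rest.length
decreasing_by
  all_goals simp

-- B's loop in the same buffer-carrying shape
def bufLoopB (buffer : List Char) (rest : List Char) : List String :=
  match rest with
  | [] => flushB buffer
  | key :: rest =>
    if key = ' ' ∨ key = '\n' ∨ key = '\t' then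
      flushB buffer ++ bufLoopB [] rest
    else if key = '(' ∨ key = ')' then
      flushB buffer ++ [String.ofList [key]] ++ bufLoopB [] rest
    else if key = '"' ∨ key = '\'' then
      flushB buffer ++
        match rest.findIdx? (· = key) with
        | none => flushB rest
        | some j =>
            [String.ofList ('"' :: rest.take j ++ ['"'])] ++ bufLoopB [] (rest.drop (j + 1))
    else
      bufLoopB (buffer ++ [key]) rest
termination_by rest.length
decreasing_by
  all_goals simp

-- run A's fold from state (buffer, mode) with empty output, then do A's final flush
def runA (buffer : List Char) (m : Option Char) (l : List Char) : List String :=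
  let fin := l.foldl wordifyStep ([], buffer, m)
  fin.1 ++ (if fin.2.1 ≠ [] then [String.ofList fin.2.1] else [])

-- A's step from a state with output out equals the step from empty output, prefixed by out
theorem stepA_out (out : List String) (b : List Char) (m : Option Char) (c : Char) :
    wordifyStep (out, b, m) c =
      ((out ++ (wordifyStep ([], b, m) c).1), (wordifyStep ([], b, m) c).2) := by
  cases m <;> simp only [wordifyStep] <;> split_ifs <;> simp

-- folding A from output out = out ++ folding from empty output (same buffer/mode)
theorem foldA_out (l : List Char) (out : List String) (b : List Char) (m : Option Char) :
    l.foldl wordifyStep (out, b, m) =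
      ((out ++ (l.foldl wordifyStep ([], b, m)).1), (l.foldl wordifyStep ([], b, m)).2) := by
  induction l generalizing out b m with
  | nil => simp
  | cons c l ih =>
    simp only [List.foldl_cons]
    rw [stepA_out out b m c, ih, ih (wordifyStep ([], b, m) c).1]
    simp

-- peel one character off runA
theorem runA_cons (c : Char) (l : List Char) (b : List Char) (m : Option Char)
    (o : List String) (b' : List Char) (m' : Option Char)
    (hst : wordifyStep ([], b, m) c = (o, b', m')) :
    runA b m (c :: l) = o ++ runA b' m' l := by
  simp only [runA, List.foldl_cons, hst]
  rw [foldA_out]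
  simp

-- A's quote mode consumes characters up to the next occurrence of q: a find-splice
theorem runA_quote (l : List Char) (buffer : List Char) (q : Char) :
    runA buffer (some q) l =
      match l.findIdx? (· = q) with
      | none => flushB (buffer ++ l)
      | some j => String.ofList ('"' :: buffer ++ l.take j ++ ['"']) :: runA [] none (l.drop (j + 1)) := by
  induction l generalizing buffer with
  | nil => by_cases hb : buffer = [] <;> simp [runA, flushB, hb]
  | cons c l ih =>
    by_cases hc : c = q
    · subst hc
      rw [runA_cons c l buffer (some c) [String.ofList ('"' :: buffer ++ ['"'])] [] none
        (by simp [wordifyStep])]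
      simp [List.findIdx?_cons]
    · rw [runA_cons c l buffer (some q) [] (buffer ++ [c]) (some q)
        (by simp [wordifyStep, hc]), ih]
      simp only [List.findIdx?_cons, decide_eq_true_eq, if_neg hc]
      cases h : l.findIdx? (· = q) with
      | none => simp
      | some j => simp

-- A in normal mode = the buffer-carrying recursion, for any shared buffer
theorem runA_eq_bufLoop (l : List Char) (buffer : List Char) :
    runA buffer none l = bufLoop buffer l := by
  induction hn : l.length using Nat.strong_induction_on generalizing l buffer with
  | _ n ih =>
  cases l with
  | nil =>
    rw [bufLoop]
    by_cases hb : buffer = [] <;> simp [runA, flushB, hb]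
  | cons c l =>
    subst hn
    rw [bufLoop]
    by_cases hws : c = ' ' ∨ c = '\n' ∨ c = '\t'
    · rw [if_pos hws,
        runA_cons c l buffer none (flushB buffer) [] none
          (by simp only [wordifyStep, if_pos hws]; split_ifs with hb <;> simp_all [flushB]),
        ih l.length (by simp) l [] rfl]
    · rw [if_neg hws]
      by_cases hp : c = '(' ∨ c = ')'
      · rw [if_pos hp,
          runA_cons c l buffer none (flushB buffer ++ [String.ofList [c]]) [] none
            (by simp only [wordifyStep, if_neg hws, if_pos hp]
                split_ifs with hb <;> simp_all [flushB]),
          ih l.length (by simp) l [] rfl]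
      · rw [if_neg hp]
        by_cases hq : c = '"' ∨ c = '\''
        · rw [if_pos hq,
            runA_cons c l buffer none (flushB buffer) buffer (some c)
              (by simp only [wordifyStep, if_neg hws, if_neg hp, if_pos hq]
                  split_ifs with hb <;> simp_all [flushB]),
            runA_quote]
          cases h : l.findIdx? (· = c) with
          | none => simp
          | some j =>
            simp [ih (l.drop (j + 1)).length (by simp) (l.drop (j + 1)) [] rfl]
        · rw [if_neg hq,
            runA_cons c l buffer none [] (buffer ++ [c]) none
              (by simp [wordifyStep, hws, hp, hq]),
            ih l.length (by simp) l (buffer ++ [c]) rfl]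
          simp

-- Chars.find for a single character is List.findIdx?
theorem find_go_singleton (q : Char) (l : List Char) (k : Nat) :
    PySem.Chars.find.go [q] l k =
      (match l.findIdx? (· = q) with | none => -1 | some j => ((k + j : Nat) : Int)) := by
  induction l generalizing k with
  | nil => simp [PySem.Chars.find.go]
  | cons c l ih =>
    rw [PySem.Chars.find.go]
    by_cases hc : c = q
    · simp [hc, List.findIdx?_cons, List.isPrefixOf]
    · have : ([q].isPrefixOf (c :: l)) = false := by
        simp [List.isPrefixOf]; intro h; exact absurd h.symm hc
      rw [this]
      simp only [Bool.false_eq_true, if_false, ih, List.findIdx?_cons, decide_eq_true_eq, if_neg hc]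
      cases h : l.findIdx? (· = q) with
      | none => simp
      | some j => simp; ring

theorem find_singleton (q : Char) (l : List Char) :
    PySem.Chars.find l [q] =
      (match l.findIdx? (· = q) with | none => -1 | some j => (j : Int)) := by
  rw [PySem.Chars.find, find_go_singleton]
  cases h : l.findIdx? (· = q) <;> simp

-- sliceBT facts
theorem sliceBT_nil_iff (cs : List Char) (a b : Nat) (hab : a ≤ b) (hb : b ≤ cs.length) :
    sliceBT cs a b = [] ↔ ¬ a < b := by
  constructor
  · intro h hcon
    have : (sliceBT cs a b).length = b - a := by simp [sliceBT]; omega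
    rw [h] at this; simp at this; omega
  · intro h
    have : b ≤ a := by omega
    simp [sliceBT]
    omega

theorem flushB_sliceBT (cs : List Char) (a b : Nat) (hab : a ≤ b) (hb : b ≤ cs.length) :
    flushB (sliceBT cs a b) =
      (if a < b then [String.ofList (sliceBT cs a b)] else []) := by
  by_cases h : a < b
  · rw [if_pos h, flushB, if_neg (by rw [sliceBT_nil_iff cs a b hab hb]; omega)]
  · rw [if_neg h, flushB, if_pos ((sliceBT_nil_iff cs a b hab hb).2 h)]

theorem sliceBT_snoc (cs : List Char) (a i : Nat) (hai : a ≤ i) (hi : i < cs.length) :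
    sliceBT cs a (i + 1) = sliceBT cs a i ++ [cs[i]] := by
  simp only [sliceBT, List.take_add_one, List.getElem?_eq_getElem hi, Option.toList_some]
  rw [List.drop_append_of_le_length (by simp; omega)]

theorem sliceBT_drop_take (cs : List Char) (a j : Nat) :
    sliceBT cs a (a + j) = (cs.drop a).take j := by
  simp [sliceBT, List.drop_take]

-- B's index scanner = the buffer-carrying recursion on the remaining suffix,
-- with buffer = the slice of the current plain run
theorem loopB_eq_bufLoopB (cs : List Char) (i start : Nat)
    (hsi : start ≤ i) (hin : i ≤ cs.length) :
    wordifyBLoop cs start i = bufLoopB (sliceBT cs start i) (cs.drop i) := by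
  induction hm : cs.length - i using Nat.strong_induction_on generalizing i start with
  | _ m ih =>
  by_cases hi : i < cs.length
  · rw [wordifyBLoop, dif_pos hi]
    have hdrop : cs.drop i = cs[i] :: cs.drop (i + 1) := List.drop_eq_getElem_cons hi
    rw [hdrop, bufLoopB]
    by_cases hws : cs[i] = ' ' ∨ cs[i] = '\n' ∨ cs[i] = '\t'
    · rw [if_pos hws, if_pos hws,
        flushB_sliceBT cs start i hsi (by omega),
        ih (cs.length - (i + 1)) (by omega) (i + 1) (i + 1) le_rfl (by omega) rfl]
      have : sliceBT cs (i + 1) (i + 1) = [] := by simp [sliceBT]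
      rw [this]
    · rw [if_neg hws, if_neg hws]
      by_cases hp : cs[i] = '(' ∨ cs[i] = ')'
      · rw [if_pos hp, if_pos hp,
          flushB_sliceBT cs start i hsi (by omega),
          ih (cs.length - (i + 1)) (by omega) (i + 1) (i + 1) le_rfl (by omega) rfl]
        have : sliceBT cs (i + 1) (i + 1) = [] := by simp [sliceBT]
        rw [this]
      · rw [if_neg hp, if_neg hp]
        by_cases hq : cs[i] = '"' ∨ cs[i] = '\''
        · rw [if_pos hq, if_pos hq,
            flushB_sliceBT cs start i hsi (by omega)]
          congr 1
          have hfr := PySem.Chars.findFrom_natCast cs [cs[i]] (i + 1) (by omega)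
          rw [find_singleton] at hfr
          cases h : (cs.drop (i + 1)).findIdx? (· = cs[i]) with
          | none =>
            rw [h] at hfr
            have hfrN : PySem.Chars.findFrom cs [cs[i]] ((i : Int) + 1) none = -1 := by
              rw [show ((i : Int) + 1) = ((i + 1 : Nat) : Int) by push_cast; ring, hfr]
              simp
            simp only [flushB]
            split_ifs <;> simp_all
          | some jr =>
            rw [h] at hfr
            have hjr : jr < (cs.drop (i + 1)).length := (List.findIdx?_eq_some_iff_findIdx_eq.mp h).1
            have hjrlen : i + 1 + jr < cs.length := by
              rw [List.length_drop] at hjr; omega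
            have hfr2 : PySem.Chars.findFrom cs [cs[i]] (Nat.cast (i + 1)) none
                = (Nat.cast (i + 1 + jr) : Int) := hfr
            have h1 : sliceBT cs (i + 1 + jr + 1) (i + 1 + jr + 1) = [] := by simp [sliceBT]
            have h2 : sliceBT cs (i + 1) (i + 1 + jr) = (cs.drop (i + 1)).take jr := by
              rw [← sliceBT_drop_take]
            have h3 : cs.drop (i + 1 + jr + 1) = (cs.drop (i + 1)).drop (jr + 1) := by
              rw [List.drop_drop]; ring_nf
            have hstep := ih (cs.length - (i + 1 + jr + 1)) (by omega) (i + 1 + jr + 1)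
              (i + 1 + jr + 1) le_rfl (by omega) rfl
            rw [h1] at hstep
            rw [if_neg (by omega)]
            rw [hfr2]
            simp only [Int.toNat_natCast]
            rw [hstep, h2, h3]
            try simp [Nat.add_assoc]
        · rw [if_neg hq, if_neg hq,
            ih (cs.length - (i + 1)) (by omega) (i + 1) start (by omega) (by omega) rfl,
            sliceBT_snoc cs start i hsi hi]
  · have hieq : i = cs.length := by omega
    rw [wordifyBLoop, dif_neg hi]
    have : cs.drop i = [] := by simp [hieq]
    rw [this, bufLoopB]
    have hsl : sliceBT cs start i = cs.drop start := by
      simp [sliceBT, hieq]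
    rw [hsl, flushB]
    split_ifs with h1 h2 h2 <;> simp_all
    omega

-- a quoted section, scanned character by character, is a findIdx? splice
theorem dScan_quote (rest : List Char) (q : Char) (p : Bool) :
    dScan rest p (some q) =
      match rest.findIdx? (· = q) with
      | none => false
      | some j => dScan (rest.drop (j + 1)) false none := by
  induction rest generalizing p with
  | nil => simp [dScan]
  | cons d rest ih =>
    by_cases hd : d = q
    · simp [dScan, hd, List.findIdx?_cons]
    · simp only [dScan, ih, List.findIdx?_cons, decide_eq_true_eq, if_neg hd]
      cases h : rest.findIdx? (· = q) with
      | none => simp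
      | some j => simp

-- outside the change region the two buffer-carrying recursions agree
theorem bufLoop_eq_of_not_dScan (l : List Char) (buffer : List Char)
    (h : dScan l (decide (buffer ≠ [])) none = false) :
    bufLoop buffer l = bufLoopB buffer l := by
  induction hn : l.length using Nat.strong_induction_on generalizing l buffer with
  | _ n ih =>
  cases l with
  | nil => rw [bufLoop, bufLoopB]
  | cons c l =>
    subst hn
    rw [bufLoop, bufLoopB]
    simp only [dScan] at h
    by_cases hws : c = ' ' ∨ c = '\n' ∨ c = '\t'
    · rw [if_pos hws, if_pos hws,
        ih l.length (by simp) l [] (by rw [if_pos (by tauto)] at h; exact h) rfl]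
    · rw [if_neg hws, if_neg hws]
      by_cases hp : c = '(' ∨ c = ')'
      · rw [if_pos hp, if_pos hp,
          ih l.length (by simp) l [] (by rw [if_pos (by tauto)] at h; exact h) rfl]
      · rw [if_neg hp, if_neg hp]
        by_cases hq : c = '"' ∨ c = '\''
        · rw [if_pos hq, if_pos hq]
          rw [if_neg (by tauto), if_pos hq] at h
          have hbe : buffer = [] := by
            by_contra hb
            simp [hb] at h
          subst hbe
          rw [dScan_quote] at h
          congr 1
          cases hf : l.findIdx? (· = c) with
          | none => simp
          | some j =>
            rw [hf] at h
            have hind := ih (l.drop (j + 1)).length (by simp) (l.drop (j + 1)) []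
              (by simpa using h) rfl
            simp [hind]
        · rw [if_neg hq, if_neg hq,
            ih l.length (by simp) l (buffer ++ [c]) (by
              rw [if_neg (by tauto), if_neg hq] at h
              simpa using h) rfl]

-- helper: String.ofList is injective (via toList)
theorem ofList_inj (a b : List Char) (h : String.ofList a = String.ofList b) : a = b := by
  have := congrArg String.toList h
  simpa using this

-- inside the change region the two recursions differ everywhere
theorem bufLoop_ne_of_dScan (l : List Char) (buffer : List Char)
    (h : dScan l (decide (buffer ≠ [])) none = true) :
    bufLoop buffer l ≠ bufLoopB buffer l := by
  induction hn : l.length using Nat.strong_induction_on generalizing l buffer with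
  | _ n ih =>
  cases l with
  | nil => simp [dScan] at h
  | cons c l =>
    subst hn
    rw [bufLoop, bufLoopB]
    simp only [dScan] at h
    by_cases hws : c = ' ' ∨ c = '\n' ∨ c = '\t'
    · rw [if_pos hws, if_pos hws]
      intro hc
      exact ih l.length (by simp) l [] (by rw [if_pos (by tauto)] at h; exact h) rfl
        (List.append_cancel_left hc)
    · rw [if_neg hws]
      by_cases hp : c = '(' ∨ c = ')'
      · rw [if_pos hp, if_pos hp, if_neg hws]
        intro hc
        exact ih l.length (by simp) l [] (by rw [if_pos (by tauto)] at h; exact h) rfl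
          (List.append_cancel_left hc)
      · by_cases hq : c = '"' ∨ c = '\''
        · rw [if_neg hp, if_pos hq, if_neg hws, if_neg hp, if_pos hq]
          rw [if_neg (by tauto), if_pos hq] at h
          by_cases hb : buffer = []
          · -- pending false: the scan went past this (empty-buffer) quote
            subst hb
            simp only [ne_eq, not_true_eq_false, decide_false, Bool.false_eq_true, if_false] at h
            rw [dScan_quote] at h
            cases hf : l.findIdx? (· = c) with
            | none => rw [hf] at h; simp at h
            | some j =>
              rw [hf] at h
              intro hc2
              exact ih (l.drop (j + 1)).length (by simp) (l.drop (j + 1)) []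
                (by simpa using h) rfl
                (by
                  have := List.append_cancel_left hc2
                  simpa using this)
          · -- pending true: the tokens themselves differ
            intro hc2
            have hc3 := List.append_cancel_left hc2
            have hblen : 0 < buffer.length := by cases buffer <;> simp_all
            cases hf : l.findIdx? (· = c) with
            | none =>
              rw [hf] at hc3
              simp only [flushB] at hc3
              have hbr : buffer ++ l ≠ [] := by simp [hb]
              rw [if_neg hbr] at hc3
              by_cases hl : l = []
              · rw [if_pos hl] at hc3; simp at hc3
              · rw [if_neg hl] at hc3
                simp only [List.cons.injEq] at hc3
                have hle := congrArg List.length (ofList_inj _ _ hc3.1)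
                rw [List.length_append] at hle
                omega
            | some j =>
              rw [hf] at hc3
              simp only [List.cons_append, List.cons.injEq] at hc3
              have hle := congrArg List.length (ofList_inj _ _ hc3.1)
              simp only [List.length_cons, List.length_append] at hle
              omega
        · rw [if_neg hp, if_neg hq, if_neg hws, if_neg hp, if_neg hq]
          refine ih l.length (by simp) l (buffer ++ [c]) ?_ rfl
          rw [if_neg (by tauto), if_neg hq] at h
          simpa using h

-- the ports reduced to the two recursions
theorem wordify_eq_bufLoop (s : String) : wordify s = bufLoop [] s.toList := by
  rw [← runA_eq_bufLoop]
  simp [wordify, runA]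

theorem wordify_alt_eq_bufLoopB (s : String) : wordify_alt s = bufLoopB [] s.toList := by
  rw [wordify_alt, loopB_eq_bufLoopB s.toList 0 0 le_rfl (by omega)]
  simp [sliceBT]

-- ===== VERDICT (by name: the statements are the Claim_ definitions above) =====
theorem wordify_spec : Claim_unchanged_wordify := by
  intro s _ hd
  show wordify s = wordify_alt s
  rw [wordify_eq_bufLoop, wordify_alt_eq_bufLoopB]
  exact bufLoop_eq_of_not_dScan s.toList [] (by
    have : dScan s.toList false none ≠ true := hd
    simpa using Bool.of_not_eq_true this)

theorem wordify_changed : Claim_changed_wordify := by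
  unfold Claim_changed_wordify
  refine ⟨by decide, by decide, by decide, ?_, by decide⟩
  show wordify_alt pvDiffWitness_wordify = ["a", "\"b\""]
  rw [wordify_alt_eq_bufLoopB]
  have ht : pvDiffWitness_wordify.toList = ['a', '"', 'b', '"'] := by decide
  rw [ht]
  simp [bufLoopB, flushB, List.findIdx?_cons]

theorem wordify_tight : Claim_exact_wordify := by
  intro s _ hd
  rw [wordify_eq_bufLoop, wordify_alt_eq_bufLoopB]
  exact bufLoop_ne_of_dScan s.toList [] (by simpa using hd)
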